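-- pv_equiv track=rewrite | github.com/soykeepgoing/algorithm | boj/implementation/1195.py | search
-- ===== SOURCE A (Python) =====
-- def search(a, b):
--     len_a = len(a)
--     len_b = len(b)
--     answer = len_a + len_b
--
--     for b_start in range(len_a):
--         flag = True
--         rest = 0
--         for b_i in range(len_b):
--             a_i = b_start + b_i
--             if a_i < len_a:
--                 if a[a_i] == b[b_i] == '2':
--                     flag = False
--                     continue
--             else:
--                 rest += 1
--         if flag:
--             answer = min(answer, len_a + rest)
--     return answer
-- ===== SOURCE B (Python) =====
-- def search(a, b):
--     n, m = len(a), len(b)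
--     # enumerate colliding pairs directly: shift s is forbidden iff some '2' of b
--     # lands on a '2' of a, i.e. s = i - j for a '2' at a[i] and a '2' at b[j]
--     bad = {i - j
--            for i in range(n) if a[i] == '2'
--            for j in range(m) if b[j] == '2' and j <= i}
--     for s in range(n):
--         if s not in bad:
--             return n + max(0, s + m - n)
--     return n + m
-- ===== Notes on version B (the rewrite author's own statement) =====
-- stated objective: faster
-- what changed: Instead of sliding b over a and re-scanning b at every shift, B enumerates the colliding pairs of '2'-positions directly (a set comprehension over the '2's of a and the '2's of b marks every forbidden shift i-j once), then returns the first unmarked shift, whose candidate length is minimal because the candidate is nondecreasing in the shift.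
import Mathlib
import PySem

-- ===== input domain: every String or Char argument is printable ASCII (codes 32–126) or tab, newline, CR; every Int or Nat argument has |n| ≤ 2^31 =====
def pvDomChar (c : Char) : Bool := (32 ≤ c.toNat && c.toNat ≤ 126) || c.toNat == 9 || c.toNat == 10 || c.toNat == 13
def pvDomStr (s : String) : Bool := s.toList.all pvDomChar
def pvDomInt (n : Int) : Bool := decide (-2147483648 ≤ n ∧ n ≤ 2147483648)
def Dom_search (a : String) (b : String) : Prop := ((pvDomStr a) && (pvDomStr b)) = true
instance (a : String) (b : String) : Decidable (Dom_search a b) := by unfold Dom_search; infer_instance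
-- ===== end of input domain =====

-- B marks every forbidden shift once from the pairs of '2'-positions and returns the
-- first unmarked shift; same return value as A, proved below.

-- ===== PORT A =====
def search (a : String) (b : String) : Int :=
  let al := a.toList
  let bl := b.toList
  let len_a := al.length
  let len_b := bl.length
  let answer : Int := (len_a : Int) + (len_b : Int)
  (List.range len_a).foldl (fun answer b_start =>
    let fr := (List.range len_b).foldl (fun (fr : Bool × Nat) b_i =>
      let a_i := b_start + b_i
      if a_i < len_a then
        if al.getD a_i ' ' = bl.getD b_i ' ' ∧ bl.getD b_i ' ' = '2' then
          (false, fr.2)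
        else fr
      else (fr.1, fr.2 + 1)) (true, 0)
    if fr.1 then min answer ((len_a : Int) + (fr.2 : Int)) else answer) answer

-- ===== PORT B =====
def search_alt (a : String) (b : String) : Int :=
  let al := a.toList
  let bl := b.toList
  let n := al.length
  let m := bl.length
  let bad : PySem.Set Nat := PySem.Set.ofList
    (((List.range n).filter (fun i => al.getD i ' ' = '2')).flatMap
      (fun i => ((List.range m).filter
          (fun j => decide (bl.getD j ' ' = '2' ∧ j ≤ i))).map (fun j => i - j)))
  match (List.range n).find? (fun s => !(PySem.Set.contains bad s)) with
  | some s => (n : Int) + max 0 ((s : Int) + (m : Int) - (n : Int))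
  | none => (n : Int) + (m : Int)

-- ===== PRECONDITION & SPEC =====
def Spec_search (a : String) (b : String) (out : Int) : Prop := out = search_alt a b
instance (a : String) (b : String) (out : Int) : Decidable (Spec_search a b out) := by unfold Spec_search; infer_instance

-- ===== CLAIM (what is proved, stated in full; the proofs are below) =====
def Claim_equal_search : Prop := ∀ (a : String) (b : String), Dom_search a b → Spec_search a b (search a b)

-- ===== LEMMAS AND PROOFS =====

-- validity of a shift s: no '2' of b lands on a '2' of a
def pvOk (al bl : List Char) (s : Nat) : Bool :=
  !(decide (∃ j < bl.length, bl.getD j ' ' = '2' ∧ s + j < al.length ∧ al.getD (s + j) ' ' = '2'))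

-- the candidate length at shift s
def pvF (la lb : Nat) (s : Nat) : Int := (la : Int) + max 0 ((s : Int) + (lb : Int) - (la : Int))

-- A's inner loop: flag and rest in closed form
lemma inner_fold (al bl : List Char) (s : Nat) (n : Nat) :
    (List.range n).foldl (fun (fr : Bool × Nat) b_i =>
      let a_i := s + b_i
      if a_i < al.length then
        if al.getD a_i ' ' = bl.getD b_i ' ' ∧ bl.getD b_i ' ' = '2' then
          (false, fr.2)
        else fr
      else (fr.1, fr.2 + 1)) (true, 0)
    = ((List.range n).all (fun b_i =>
          !(decide (s + b_i < al.length ∧ al.getD (s + b_i) ' ' = bl.getD b_i ' '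
              ∧ bl.getD b_i ' ' = '2'))),
       ((List.range n).filter (fun b_i => !(decide (s + b_i < al.length)))).length) := by
  induction n with
  | zero => simp
  | succ n ih =>
      rw [List.range_succ, List.foldl_append, List.all_append, List.filter_append, ih]
      by_cases h1 : s + n < al.length
      · by_cases h2 : al.getD (s + n) ' ' = bl.getD n ' ' ∧ bl.getD n ' ' = '2'
        · have hd : decide (s + n < al.length ∧ al.getD (s + n) ' ' = bl.getD n ' '
              ∧ bl.getD n ' ' = '2') = true := by
            rw [decide_eq_true_eq]; exact ⟨h1, h2⟩
          simp only [List.foldl_cons, List.foldl_nil, List.all_cons, List.all_nil,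
            List.filter_cons, List.filter_nil, if_pos h1, if_pos h2, hd]
          simp [h1]
        · have hd : decide (s + n < al.length ∧ al.getD (s + n) ' ' = bl.getD n ' '
              ∧ bl.getD n ' ' = '2') = false := by
            rw [decide_eq_false_iff_not]; rintro ⟨-, h⟩; exact h2 h
          simp only [List.foldl_cons, List.foldl_nil, List.all_cons, List.all_nil,
            List.filter_cons, List.filter_nil, if_pos h1, if_neg h2, hd]
          simp [h1]
      · have hd : decide (s + n < al.length ∧ al.getD (s + n) ' ' = bl.getD n ' '
            ∧ bl.getD n ' ' = '2') = false := by
          rw [decide_eq_false_iff_not]; rintro ⟨h, -⟩; exact h1 h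
        simp only [List.foldl_cons, List.foldl_nil, List.all_cons, List.all_nil,
          List.filter_cons, List.filter_nil, if_neg h1, hd]
        simp [h1]

-- flag in closed form equals pvOk
lemma flag_eq_ok (al bl : List Char) (s : Nat) :
    ((List.range bl.length).all (fun b_i =>
        !(decide (s + b_i < al.length ∧ al.getD (s + b_i) ' ' = bl.getD b_i ' '
            ∧ bl.getD b_i ' ' = '2')))) = pvOk al bl s := by
  rw [Bool.eq_iff_iff]
  simp only [pvOk, List.all_eq_true, List.mem_range, Bool.not_eq_true',
    decide_eq_false_iff_not, not_exists]
  constructor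
  · rintro h j ⟨hj, hb2, hlt, ha⟩
    exact h j hj ⟨hlt, by rw [ha, hb2], hb2⟩
  · rintro h j hj ⟨hlt, hab, hb2⟩
    exact h j ⟨hj, hb2, hlt, by rw [hab, hb2]⟩

-- B's membership test equals pvOk
lemma contains_eq_ok (al bl : List Char) (s : Nat) :
    (!(PySem.Set.contains (PySem.Set.ofList
        (((List.range al.length).filter (fun i => al.getD i ' ' = '2')).flatMap
          (fun i => ((List.range bl.length).filter
              (fun j => decide (bl.getD j ' ' = '2' ∧ j ≤ i))).map (fun j => i - j)))) s))
      = pvOk al bl s := by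
  rw [Bool.eq_iff_iff]
  simp only [pvOk, Bool.not_eq_eq_eq_not, Bool.not_true,
    decide_eq_false_iff_not]
  rw [← Bool.not_eq_true, PySem.Set.contains_iff, PySem.Set.mem_ofList]
  simp only [List.mem_flatMap, List.mem_map, List.mem_filter, List.mem_range,
    decide_eq_true_eq, not_exists]
  constructor
  · rintro h j ⟨hj, hb2, hlt, ha⟩
    exact h (s + j) ⟨⟨hlt, ha⟩, j, ⟨⟨hj, hb2, Nat.le_add_left j s⟩, by omega⟩⟩
  · rintro h i ⟨⟨hi, ha⟩, j, ⟨⟨hj, hb2, hji⟩, hij⟩⟩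
    have : i = s + j := by omega
    subst this
    exact h j ⟨hj, hb2, hi, ha⟩

-- rest in closed form: number of overhanging positions
lemma rest_eq (la : Nat) (s : Nat) (hs : s ≤ la) (n : Nat) :
    (((List.range n).filter (fun b_i => !(decide (s + b_i < la)))).length : Int)
      = max 0 ((s : Int) + (n : Int) - (la : Int)) := by
  induction n with
  | zero => simp; omega
  | succ n ih =>
      rw [List.range_succ, List.filter_append, List.length_append]
      by_cases h : s + n < la
      · simp only [List.filter_cons, List.filter_nil, h, decide_true, Bool.not_true,
          Bool.false_eq_true, if_false, List.length_nil, Nat.add_zero]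
        rw [ih]
        omega
      · simp only [List.filter_cons, List.filter_nil, h, decide_false, Bool.not_false,
          if_true, List.length_cons, List.length_nil, Nat.zero_add]
        push_cast
        rw [ih]
        omega

-- a fold of conditional min is fixed once the accumulator is below everything valid
lemma foldl_min_stop (p : Nat → Bool) (f : Nat → Int) :
    ∀ (l : List Nat) (x : Int), (∀ t ∈ l, p t = true → x ≤ f t) →
      l.foldl (fun ans t => if p t then min ans (f t) else ans) x = x := by
  intro l
  induction l with
  | nil => intro x _; rfl
  | cons t l ih =>
      intro x hx
      simp only [List.foldl_cons]
      by_cases hp : p t = true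
      · have : min x (f t) = x := min_eq_left (hx t (List.mem_cons_self) hp)
        rw [if_pos hp, this]
        exact ih x (fun u hu => hx u (List.mem_cons_of_mem _ hu))
      · rw [if_neg hp]
        exact ih x (fun u hu => hx u (List.mem_cons_of_mem _ hu))

-- the conditional-min fold over an f-sorted list equals the value at the first valid element
lemma foldl_min_find (p : Nat → Bool) (f : Nat → Int) :
    ∀ (l : List Nat) (init : Int), l.Pairwise (fun s t => f s ≤ f t) →
      (∀ s ∈ l, p s = true → f s ≤ init) →
      l.foldl (fun ans t => if p t then min ans (f t) else ans) init =
        (match l.find? p with | some s => f s | none => init) := by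
  intro l
  induction l with
  | nil => intro init _ _; rfl
  | cons t l ih =>
      intro init hpw hinit
      have ht : ∀ u ∈ l, f t ≤ f u := (List.pairwise_cons.mp hpw).1
      have hpw' := (List.pairwise_cons.mp hpw).2
      simp only [List.foldl_cons, List.find?_cons]
      by_cases hp : p t = true
      · rw [if_pos hp, hp]
        have hle : f t ≤ init := hinit t (List.mem_cons_self) hp
        have hmin : min init (f t) = f t := min_eq_right hle
        rw [hmin]
        exact foldl_min_stop p f l (f t) (fun u hu _ => ht u hu)
      · rw [if_neg hp, Bool.of_not_eq_true hp]
        exact ih init hpw' (fun u hu hpu => hinit u (List.mem_cons_of_mem _ hu) hpu)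

-- ===== VERDICT (by name: the statement is the Claim_ definition above) =====
theorem search_spec : Claim_equal_search := by
  intro a b _
  unfold Spec_search search search_alt
  simp only []
  set al := a.toList
  set bl := b.toList
  set la := al.length
  set lb := bl.length
  -- rewrite A's outer fold into conditional-min form over pvOk / pvF
  have hcongr :
      (List.range la).foldl (fun answer b_start =>
        let fr := (List.range lb).foldl (fun (fr : Bool × Nat) b_i =>
          let a_i := b_start + b_i
          if a_i < la then
            if al.getD a_i ' ' = bl.getD b_i ' ' ∧ bl.getD b_i ' ' = '2' then
              (false, fr.2)
            else fr
          else (fr.1, fr.2 + 1)) (true, 0)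
        if fr.1 then min answer ((la : Int) + (fr.2 : Int)) else answer)
        ((la : Int) + (lb : Int))
      = (List.range la).foldl (fun ans s =>
          if pvOk al bl s then min ans (pvF la lb s) else ans) ((la : Int) + (lb : Int)) := by
    apply PySem.List.foldl_congr_mem
    intro acc s hs
    rw [inner_fold al bl s lb]
    simp only []
    rw [flag_eq_ok al bl s]
    have hr : ((la : Int) + ((((List.range lb).filter
        (fun b_i => !(decide (s + b_i < la)))).length : Nat) : Int)) = pvF la lb s := by
      rw [pvF, rest_eq la s (Nat.le_of_lt (List.mem_range.mp hs)) lb]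
    rw [hr]
  rw [hcongr]
  have hpw : (List.range la).Pairwise (fun s t => pvF la lb s ≤ pvF la lb t) := by
    have := List.pairwise_lt_range (n := la)
    exact this.imp (fun h => by simp only [pvF]; omega)
  have hinit : ∀ s ∈ List.range la, pvOk al bl s = true → pvF la lb s ≤ (la : Int) + (lb : Int) := by
    intro s hs _
    have : s < la := List.mem_range.mp hs
    simp only [pvF]
    omega
  rw [foldl_min_find (pvOk al bl) (pvF la lb) (List.range la) ((la : Int) + (lb : Int)) hpw hinit]
  have hp : (fun s => !(PySem.Set.contains (PySem.Set.ofList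
        (((List.range la).filter (fun i => al.getD i ' ' = '2')).flatMap
          (fun i => ((List.range lb).filter
              (fun j => decide (bl.getD j ' ' = '2' ∧ j ≤ i))).map (fun j => i - j)))) s))
      = pvOk al bl := funext (fun s => contains_eq_ok al bl s)
  rw [hp]
  rcases (List.range la).find? (pvOk al bl) with _ | s
  · rfl
  · simp [pvF]
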